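-- pv_equiv track=rewrite | github.com/Kallzor/PythonPrograms- | beekeeper/main.py | count_wovels
-- ===== SOURCE A (Python) =====
-- def count_wovels(w):
--     v = [
--         "aa",
--         "ee",
--         "ii",
--         "oo",
--         "uu",
--         "yy"
--     ]
--
--     return sum([w.count(b) for b in v])
-- ===== SOURCE B (Python) =====
-- def count_wovels(w):
--     vowels = {'a', 'e', 'i', 'o', 'u', 'y'}
--     n = len(w)
--     i = 0
--     total = 0
--     while i + 1 < n:
--         if w[i] == w[i + 1] and w[i] in vowels:
--             total += 1
--             i += 2
--         else:
--             i += 1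
--     return total
-- ===== Notes on version B (the rewrite author's own statement) =====
-- stated objective: alternative
-- what changed: Replaces six separate non-overlapping str.count scans of the string with one single left-to-right pass that checks each adjacent pair against a vowel set and skips two positions on a match (preserving str.count's non-overlapping semantics).
import Mathlib
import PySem

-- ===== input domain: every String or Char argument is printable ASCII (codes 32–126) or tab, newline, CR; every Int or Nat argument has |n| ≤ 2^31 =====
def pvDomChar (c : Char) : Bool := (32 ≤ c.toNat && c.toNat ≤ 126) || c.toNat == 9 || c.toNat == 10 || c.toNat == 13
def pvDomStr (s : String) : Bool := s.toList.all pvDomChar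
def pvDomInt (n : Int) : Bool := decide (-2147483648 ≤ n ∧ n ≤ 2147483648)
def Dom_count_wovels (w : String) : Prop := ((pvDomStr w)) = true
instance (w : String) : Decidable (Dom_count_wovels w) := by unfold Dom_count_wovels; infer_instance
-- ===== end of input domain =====

-- B replaces A's six separate non-overlapping str.count scans with one single pass
-- over adjacent pairs (skipping two on a match); alternative decomposition, same result.

-- ===== PORT A =====
def count_wovels (w : String) : Int :=
  let v : List String := ["aa", "ee", "ii", "oo", "uu", "yy"]
  (v.map (fun b => (PySem.Str.count w b : Int))).sum

-- ===== PORT B =====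
def pvVowels : List Char := ['a', 'e', 'i', 'o', 'u', 'y']

-- the while loop of Source B, as structural recursion over the remaining suffix
def pvAltLoop : List Char → Int
  | x :: y :: t => if x = y ∧ x ∈ pvVowels then 1 + pvAltLoop t else pvAltLoop (y :: t)
  | _ => 0

def count_wovels_alt (w : String) : Int := pvAltLoop w.toList

-- ===== PRECONDITION & SPEC =====
def Spec_count_wovels (w : String) (out : Int) : Prop := out = count_wovels_alt w
instance (w : String) (out : Int) : Decidable (Spec_count_wovels w out) := by unfold Spec_count_wovels; infer_instance

-- ===== CLAIM (what is proved, stated in full; the proofs are below) =====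
def Claim_equal_count_wovels : Prop := ∀ (w : String), Dom_count_wovels w → Spec_count_wovels w (count_wovels w)

-- ===== LEMMAS AND PROOFS =====

-- proof-side counter: non-overlapping occurrences of the doubled character c
def pvCnt2 (c : Char) : List Char → Nat
  | x :: y :: t => if x = c ∧ y = c then pvCnt2 c t + 1 else pvCnt2 c (y :: t)
  | _ => 0

theorem pvCnt2_cons_ne {c x : Char} (h : x ≠ c) (t : List Char) :
    pvCnt2 c (x :: t) = pvCnt2 c t := by
  match t with
  | [] => simp [pvCnt2]
  | y :: t' => simp [pvCnt2, h]

theorem pv_go_nil (sub : List Char) (fuel acc : Nat) :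
    PySem.Chars.count.go sub fuel [] acc = acc := by
  cases fuel <;> simp [PySem.Chars.count.go]

theorem pv_go_eq (c : Char) :
    ∀ (fuel : Nat) (l : List Char) (acc : Nat), l.length ≤ fuel →
      PySem.Chars.count.go [c, c] fuel l acc = acc + pvCnt2 c l := by
  intro fuel
  induction fuel with
  | zero =>
    intro l acc h
    have : l = [] := List.eq_nil_of_length_eq_zero (Nat.le_zero.mp h)
    subst this; simp [pv_go_nil, pvCnt2]
  | succ n ih =>
    intro l acc h
    match l with
    | [] => simp [pv_go_nil, pvCnt2]
    | [x] =>
      have hp : [c, c].isPrefixOf [x] = false := by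
        cases hb : [c, c].isPrefixOf [x]
        · rfl
        · have := List.IsPrefix.length_le (List.isPrefixOf_iff_prefix.mp hb)
          simp at this
      simp only [PySem.Chars.count.go]
      rw [if_neg (by rw [hp]; simp), pv_go_nil]
      simp [pvCnt2]
    | x :: y :: t =>
      by_cases hxy : x = c ∧ y = c
      · obtain ⟨hx, hy⟩ := hxy
        have hp : ([c, c] : List Char).isPrefixOf (x :: y :: t) = true := by
          simp [List.isPrefixOf, hx, hy]
        simp only [PySem.Chars.count.go]
        rw [if_pos (by rw [hp])]
        have ht : t.length ≤ n := by simp at h; omega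
        simp only [List.length_cons, List.drop_succ_cons, List.length_nil, Nat.zero_add, List.drop_zero]
        rw [ih t (acc + 1) ht]
        simp [pvCnt2, hx, hy]
        omega
      · have hp : ([c, c] : List Char).isPrefixOf (x :: y :: t) = false := by
          cases hb : ([c, c] : List Char).isPrefixOf (x :: y :: t)
          · rfl
          · exfalso
            have := List.isPrefixOf_iff_prefix.mp hb
            rcases this with ⟨s, hs⟩
            simp at hs
            exact hxy ⟨hs.1.symm, hs.2.1.symm⟩
        simp only [PySem.Chars.count.go]
        rw [if_neg (by rw [hp]; simp)]
        have ht : (y :: t).length ≤ n := by simp at h ⊢; omega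
        rw [ih (y :: t) acc ht]
        have : pvCnt2 c (x :: y :: t) = pvCnt2 c (y :: t) := by
          simp only [pvCnt2]
          rw [if_neg hxy]
        rw [this]

theorem pv_count_cc (c : Char) (l : List Char) :
    PySem.Chars.count l [c, c] = pvCnt2 c l := by
  unfold PySem.Chars.count
  simp
  simpa using pv_go_eq c l.length l 0 (le_refl _)

-- sum over the vowel list of per-vowel counts equals the single pass
theorem pv_sum_map_eq_of_bump {L : List Char} {f g : Char → Nat} {x : Char}
    (hnd : L.Nodup) (hx : x ∈ L) (hfx : f x = g x + 1)
    (hne : ∀ c ∈ L, c ≠ x → f c = g c) :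
    (L.map f).sum = (L.map g).sum + 1 := by
  induction L with
  | nil => cases hx
  | cons a t ih =>
    rcases List.mem_cons.mp hx with rfl | hxt
    · have : ∀ c ∈ t, f c = g c := by
        intro c hc
        exact hne c (List.mem_cons_of_mem _ hc) (fun h => (List.nodup_cons.mp hnd).1 (h ▸ hc))
      simp [hfx, List.map_congr_left this]; omega
    · have hax : a ≠ x := fun h => (List.nodup_cons.mp hnd).1 (h ▸ hxt)
      have := ih (List.nodup_cons.mp hnd).2 hxt
        (fun c hc hcx => hne c (List.mem_cons_of_mem _ hc) hcx)
      simp [hne a (List.mem_cons_self) hax, this]; omega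

theorem pv_main (l : List Char) :
    pvAltLoop l = ((pvVowels.map (fun c => pvCnt2 c l)).sum : Nat) := by
  match l with
  | [] => simp [pvAltLoop, pvVowels, pvCnt2]
  | [x] => simp [pvAltLoop, pvVowels, pvCnt2]
  | x :: y :: t =>
    by_cases hm : x = y ∧ x ∈ pvVowels
    · obtain ⟨rfl, hv⟩ := hm
      have hsum : (pvVowels.map (fun c => pvCnt2 c (x :: x :: t))).sum
          = (pvVowels.map (fun c => pvCnt2 c t)).sum + 1 := by
        apply pv_sum_map_eq_of_bump (by decide) hv
        · simp [pvCnt2]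
        · intro c _ hcx
          rw [pvCnt2_cons_ne (fun h => hcx h.symm) , pvCnt2_cons_ne (fun h => hcx h.symm)]
      rw [hsum]
      have := pv_main t
      simp [pvAltLoop, hv, this]
      ring
    · have hsum : (pvVowels.map (fun c => pvCnt2 c (x :: y :: t))).sum
          = (pvVowels.map (fun c => pvCnt2 c (y :: t))).sum := by
        congr 1
        apply List.map_congr_left
        intro c hc
        by_cases hxc : x = c
        · subst hxc
          have hxy : x ≠ y := fun h => hm ⟨h, hc⟩
          simp [pvCnt2]
          intro h; exact absurd h.symm hxy
        · exact pvCnt2_cons_ne (Ne.symm (fun h => hxc h.symm)) _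
      rw [hsum]
      have := pv_main (y :: t)
      have hstep : pvAltLoop (x :: y :: t) = pvAltLoop (y :: t) := by
        simp [pvAltLoop]
        intro h1 h2; exact absurd ⟨h1, h2⟩ hm
      rw [hstep, this]
  termination_by l.length

-- ===== VERDICT (by name: the statement is the Claim_ definition above) =====
theorem count_wovels_spec : Claim_equal_count_wovels := by
  intro w _
  unfold Spec_count_wovels count_wovels count_wovels_alt
  rw [pv_main]
  simp only [PySem.Str.count]
  have h1 : ("aa" : String).toList = ['a','a'] := by decide
  have h2 : ("ee" : String).toList = ['e','e'] := by decide
  have h3 : ("ii" : String).toList = ['i','i'] := by decide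
  have h4 : ("oo" : String).toList = ['o','o'] := by decide
  have h5 : ("uu" : String).toList = ['u','u'] := by decide
  have h6 : ("yy" : String).toList = ['y','y'] := by decide
  simp [h1, h2, h3, h4, h5, h6, pv_count_cc, pvVowels]
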